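-- pv_equiv track=rewrite | github.com/RyanNg1403/MACLA-Implementation | MACLA.py | _generate_fallback_actions
-- ===== SOURCE A (Python) =====
-- from typing import Dict, List, Tuple, Optional, Set
--
-- def _generate_fallback_actions(goal: str) -> List[str]:
--     """
--     Domain-agnostic fallback using abstract role slots.
--     REMOVED: All hard-coded appliance references (microwave, fridge, sink)
--     """
--     goal_lower = goal.lower()
--
--     # Identify goal type via generic verb analysis
--     if any(v in goal_lower for v in ['find', 'locate', 'search', 'get', 'retrieve']):
--         return [
--             "perceive <environment>",
--             "identify <target_entity>",
--             "plan <approach>",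
--             "execute <primary_action>",
--             "verify <outcome>"
--         ]
--     elif any(v in goal_lower for v in ['put', 'place', 'move', 'transfer']):
--         return [
--             "acquire <object>",
--             "navigate to <destination>",
--             "place <object> at <destination>",
--             "verify placement"
--         ]
--     elif any(v in goal_lower for v in ['select', 'choose', 'buy', 'purchase', 'filter']):
--         return [
--             "browse <options>",
--             "evaluate <criteria>",
--             "select <choice>",
--             "confirm selection"
--         ]
--     elif any(v in goal_lower for v in ['query', 'select', 'join', 'insert', 'update']):
--         return [
--             "parse <query>",
--             "identify <tables>",
--             "execute <operation>",
--             "return <results>"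
--         ]
--     elif any(v in goal_lower for v in ['heat', 'warm', 'cook']):
--         return [
--             "acquire <object>",
--             "activate <heating_device>",
--             "place <object> in <heating_device>",
--             "monitor <process>",
--             "retrieve <object>"
--         ]
--     elif any(v in goal_lower for v in ['cool', 'chill', 'refrigerate']):
--         return [
--             "acquire <object>",
--             "open <cooling_device>",
--             "place <object> in <cooling_device>",
--             "verify storage"
--         ]
--     elif any(v in goal_lower for v in ['clean', 'wash', 'rinse']):
--         return [
--             "acquire <object>",
--             "activate <cleaning_device>",
--             "apply <cleaning_agent>",
--             "rinse <object>",
--             "dry <object>"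
--         ]
--
--     # Default generic protocol (works for ANY domain)
--     return [
--         "perceive <environment>",
--         "locate <target>",
--         "navigate to <location>",
--         "interact with <object>",
--         "verify <outcome>"
--     ]
-- ===== SOURCE B (Python) =====
-- # B: flat keyword->rule-index map scanned once keeping the minimum matched index,
-- # then one lookup into an action table (first matching branch == minimum index;
-- # the duplicate 'select' keyword keeps its first index, 2).
--
-- _ACTIONS = [
--     ["perceive <environment>", "identify <target_entity>", "plan <approach>",
--      "execute <primary_action>", "verify <outcome>"],
--     ["acquire <object>", "navigate to <destination>",
--      "place <object> at <destination>", "verify placement"],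
--     ["browse <options>", "evaluate <criteria>", "select <choice>", "confirm selection"],
--     ["parse <query>", "identify <tables>", "execute <operation>", "return <results>"],
--     ["acquire <object>", "activate <heating_device>",
--      "place <object> in <heating_device>", "monitor <process>", "retrieve <object>"],
--     ["acquire <object>", "open <cooling_device>",
--      "place <object> in <cooling_device>", "verify storage"],
--     ["acquire <object>", "activate <cleaning_device>", "apply <cleaning_agent>",
--      "rinse <object>", "dry <object>"],
--     ["perceive <environment>", "locate <target>", "navigate to <location>",
--      "interact with <object>", "verify <outcome>"],  # default protocol
-- ]
--
-- _KEYWORD_INDEX = {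
--     'find': 0, 'locate': 0, 'search': 0, 'get': 0, 'retrieve': 0,
--     'put': 1, 'place': 1, 'move': 1, 'transfer': 1,
--     'select': 2, 'choose': 2, 'buy': 2, 'purchase': 2, 'filter': 2,
--     'query': 3, 'join': 3, 'insert': 3, 'update': 3,
--     'heat': 4, 'warm': 4, 'cook': 4,
--     'cool': 5, 'chill': 5, 'refrigerate': 5,
--     'clean': 6, 'wash': 6, 'rinse': 6,
-- }
--
-- def _generate_fallback_actions(goal: str):
--     goal_lower = goal.lower()
--     best = len(_ACTIONS) - 1  # default protocol
--     for kw, idx in _KEYWORD_INDEX.items():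
--         if kw in goal_lower:
--             best = min(best, idx)
--     return list(_ACTIONS[best])
-- ===== Notes on version B (the rewrite author's own statement) =====
-- stated objective: alternative
-- what changed: Replaces the seven-branch if-elif keyword chain with a flat keyword-to-rule-index map folded in a single pass keeping the minimum matched index (first matching branch = minimum index; the duplicate 'select' keyword keeps its first index 2), followed by one lookup into an action table.
import Mathlib
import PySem

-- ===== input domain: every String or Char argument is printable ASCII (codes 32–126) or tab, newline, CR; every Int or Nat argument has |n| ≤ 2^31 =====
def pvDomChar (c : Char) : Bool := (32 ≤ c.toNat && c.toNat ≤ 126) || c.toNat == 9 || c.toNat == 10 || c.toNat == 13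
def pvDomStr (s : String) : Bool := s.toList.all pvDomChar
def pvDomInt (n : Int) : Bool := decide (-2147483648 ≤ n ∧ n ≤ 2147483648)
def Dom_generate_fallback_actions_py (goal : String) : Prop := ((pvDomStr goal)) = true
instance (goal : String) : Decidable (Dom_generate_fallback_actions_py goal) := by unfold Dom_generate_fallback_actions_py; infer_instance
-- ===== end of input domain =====

-- B replaces A's if-elif chain with a flat keyword→index map folded to the minimum matched index plus one table lookup (alternative structure, same cost).


-- ===== PORT A =====
-- Literal port of A: the if-elif chain over `any(v in goal_lower for v in [...])` tests.
def generate_fallback_actions_py (goal : String) : List String :=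
  let goal_lower := PySem.Str.lower goal
  if ["find", "locate", "search", "get", "retrieve"].any (fun v => PySem.Str.isIn v goal_lower) then
    ["perceive <environment>", "identify <target_entity>", "plan <approach>",
     "execute <primary_action>", "verify <outcome>"]
  else if ["put", "place", "move", "transfer"].any (fun v => PySem.Str.isIn v goal_lower) then
    ["acquire <object>", "navigate to <destination>",
     "place <object> at <destination>", "verify placement"]
  else if ["select", "choose", "buy", "purchase", "filter"].any (fun v => PySem.Str.isIn v goal_lower) then
    ["browse <options>", "evaluate <criteria>", "select <choice>", "confirm selection"]
  else if ["query", "select", "join", "insert", "update"].any (fun v => PySem.Str.isIn v goal_lower) then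
    ["parse <query>", "identify <tables>", "execute <operation>", "return <results>"]
  else if ["heat", "warm", "cook"].any (fun v => PySem.Str.isIn v goal_lower) then
    ["acquire <object>", "activate <heating_device>",
     "place <object> in <heating_device>", "monitor <process>", "retrieve <object>"]
  else if ["cool", "chill", "refrigerate"].any (fun v => PySem.Str.isIn v goal_lower) then
    ["acquire <object>", "open <cooling_device>",
     "place <object> in <cooling_device>", "verify storage"]
  else if ["clean", "wash", "rinse"].any (fun v => PySem.Str.isIn v goal_lower) then
    ["acquire <object>", "activate <cleaning_device>", "apply <cleaning_agent>",
     "rinse <object>", "dry <object>"]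
  else
    ["perceive <environment>", "locate <target>", "navigate to <location>",
     "interact with <object>", "verify <outcome>"]

-- ===== PORT B =====
-- B's action table; index 7 is the default generic protocol.
def pvActions : List (List String) :=
  [ ["perceive <environment>", "identify <target_entity>", "plan <approach>",
     "execute <primary_action>", "verify <outcome>"],
    ["acquire <object>", "navigate to <destination>",
     "place <object> at <destination>", "verify placement"],
    ["browse <options>", "evaluate <criteria>", "select <choice>", "confirm selection"],
    ["parse <query>", "identify <tables>", "execute <operation>", "return <results>"],
    ["acquire <object>", "activate <heating_device>",
     "place <object> in <heating_device>", "monitor <process>", "retrieve <object>"],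
    ["acquire <object>", "open <cooling_device>",
     "place <object> in <cooling_device>", "verify storage"],
    ["acquire <object>", "activate <cleaning_device>", "apply <cleaning_agent>",
     "rinse <object>", "dry <object>"],
    ["perceive <environment>", "locate <target>", "navigate to <location>",
     "interact with <object>", "verify <outcome>"] ]

-- B's flat keyword→index dict as an association list in insertion order.
def pvKeywordIndex : List (String × Nat) :=
  [ ("find", 0), ("locate", 0), ("search", 0), ("get", 0), ("retrieve", 0),
    ("put", 1), ("place", 1), ("move", 1), ("transfer", 1),
    ("select", 2), ("choose", 2), ("buy", 2), ("purchase", 2), ("filter", 2),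
    ("query", 3), ("join", 3), ("insert", 3), ("update", 3),
    ("heat", 4), ("warm", 4), ("cook", 4),
    ("cool", 5), ("chill", 5), ("refrigerate", 5),
    ("clean", 6), ("wash", 6), ("rinse", 6) ]

-- Port of B: one fold over the keyword map keeping the minimum matched index,
-- then one lookup (best ≤ 7 < pvActions.length always, so getD never defaults).
def generate_fallback_actions_py_alt (goal : String) : List String :=
  let goal_lower := PySem.Str.lower goal
  let best := pvKeywordIndex.foldl
    (fun b p => if PySem.Str.isIn p.1 goal_lower then min b p.2 else b)
    (pvActions.length - 1)
  pvActions.getD best []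

-- ===== PRECONDITION & SPEC =====
def Spec_generate_fallback_actions_py (goal : String) (out : List String) : Prop := out = generate_fallback_actions_py_alt goal
instance (goal : String) (out : List String) : Decidable (Spec_generate_fallback_actions_py goal out) := by unfold Spec_generate_fallback_actions_py; infer_instance

-- ===== CLAIM (what is proved, stated in full; the proofs are below) =====
def Claim_equal_generate_fallback_actions_py : Prop := ∀ (goal : String), Dom_generate_fallback_actions_py goal → Spec_generate_fallback_actions_py goal (generate_fallback_actions_py goal)

-- ===== LEMMAS AND PROOFS =====

-- Folding B's step function over a block of keywords sharing one index i
-- equals: min with i if any keyword of the block matches, else unchanged.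
theorem pv_fold_block (g : String) (i b : Nat) (kws : List String) :
    (kws.map (fun k => (k, i))).foldl
      (fun b p => if PySem.Str.isIn p.1 g then min b p.2 else b) b
    = if kws.any (fun k => PySem.Str.isIn k g) then min b i else b := by
  induction kws generalizing b with
  | nil => simp
  | cons k ks ih =>
    simp only [List.map_cons, List.foldl_cons, List.any_cons]
    rw [ih]
    rcases Bool.eq_false_or_eq_true (PySem.Str.isIn k g) with hk | hk <;>
      rcases Bool.eq_false_or_eq_true (ks.any fun k => PySem.Str.isIn k g) with hks | hks <;>
        simp only [hk, hks, Bool.true_or, Bool.false_or, Bool.or_false, reduceIte] <;>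
        simp [Nat.min_assoc]

-- ===== VERDICT (by name: the statement is the Claim_ definition above) =====
theorem generate_fallback_actions_py_spec : Claim_equal_generate_fallback_actions_py := by
  intro goal _
  unfold Spec_generate_fallback_actions_py
  simp only [generate_fallback_actions_py, generate_fallback_actions_py_alt]
  set g := PySem.Str.lower goal with hg
  -- decompose B's keyword map into its constant-index blocks ('select' split off)
  have hsplit : pvKeywordIndex =
      (["find","locate","search","get","retrieve"].map (fun k => (k,0)))
      ++ (["put","place","move","transfer"].map (fun k => (k,1)))
      ++ (["select"].map (fun k => (k,2)))
      ++ (["choose","buy","purchase","filter"].map (fun k => (k,2)))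
      ++ (["query","join","insert","update"].map (fun k => (k,3)))
      ++ (["heat","warm","cook"].map (fun k => (k,4)))
      ++ (["cool","chill","refrigerate"].map (fun k => (k,5)))
      ++ (["clean","wash","rinse"].map (fun k => (k,6))) := by rfl
  rw [hsplit]
  simp only [List.foldl_append]
  cases h0 : (["find","locate","search","get","retrieve"].any (fun k => PySem.Str.isIn k g)) <;>
  cases h1 : (["put","place","move","transfer"].any (fun k => PySem.Str.isIn k g)) <;>
  cases hs : PySem.Str.isIn "select" g <;>
  cases h2 : (["choose","buy","purchase","filter"].any (fun k => PySem.Str.isIn k g)) <;>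
  cases h3 : (["query","join","insert","update"].any (fun k => PySem.Str.isIn k g)) <;>
  cases h4 : (["heat","warm","cook"].any (fun k => PySem.Str.isIn k g)) <;>
  cases h5 : (["cool","chill","refrigerate"].any (fun k => PySem.Str.isIn k g)) <;>
  cases h6 : (["clean","wash","rinse"].any (fun k => PySem.Str.isIn k g)) <;>
    (simp only [List.any_cons, List.any_nil, Bool.or_false] at h0 h1 h2 h3 h4 h5 h6;
     simp only [pv_fold_block, List.any_cons, List.any_nil, Bool.or_false,
                h0, h1, h2, h3, h4, h5, h6, hs,
                Bool.true_or, Bool.or_true, Bool.false_or, reduceIte];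
     try rfl)
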